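-- pv_equiv track=rewrite | github.com/OpenXT/sync-cli | sync_cli_completion/main.py | _get_unambiguous_prefix
-- ===== SOURCE A (Python) =====
-- def _get_unambiguous_prefix(opt, args):
--     length = len("--") + 1
--     for other_opts, _ in args:
--         for other in other_opts:
--             if other != opt:
--                 while other[:length] == opt[:length]:
--                     length += 1
--     return opt[:length]
-- ===== SOURCE B (Python) =====
-- def _get_unambiguous_prefix(opt, args):
--     best = 2
--     for other_opts, _ in args:
--         for other in other_opts:
--             if other != opt:
--                 c = 0
--                 for x, y in zip(other, opt):
--                     if x != y:
--                         break
--                     c += 1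
--                 if c > best:
--                     best = c
--     return opt[:best + 1]
-- ===== Notes on version B (the rewrite author's own statement) =====
-- stated objective: simpler
-- what changed: Replaces the shared monotonically-extending while-counter over string slices with an independent per-pair common-prefix length (zip/break counter) and a running maximum, returning opt[:max(3, best+1)].
import Mathlib
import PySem

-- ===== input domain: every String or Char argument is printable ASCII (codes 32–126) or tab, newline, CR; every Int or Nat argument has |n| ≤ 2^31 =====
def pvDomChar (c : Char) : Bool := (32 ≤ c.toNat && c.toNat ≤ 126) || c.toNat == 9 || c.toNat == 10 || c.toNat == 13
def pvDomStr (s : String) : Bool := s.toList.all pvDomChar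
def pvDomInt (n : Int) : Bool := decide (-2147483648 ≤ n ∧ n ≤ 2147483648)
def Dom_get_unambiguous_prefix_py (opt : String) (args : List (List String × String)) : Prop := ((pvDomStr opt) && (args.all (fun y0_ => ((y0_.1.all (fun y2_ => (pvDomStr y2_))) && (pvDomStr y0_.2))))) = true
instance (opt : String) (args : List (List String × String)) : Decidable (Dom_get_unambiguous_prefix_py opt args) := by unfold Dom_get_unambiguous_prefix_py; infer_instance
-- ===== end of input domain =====

-- B replaces A's shared monotonically-extending while-counter with an independent
-- per-pair common-prefix length plus a running maximum (objective: simpler).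


-- ===== PORT A =====
-- termination helper for the while loop: if the slices agree, length ≤ other.length
theorem pvA_take_le {other opt : List Char} {L : Nat} (hne : other ≠ opt)
    (h : other.take L = opt.take L) : L ≤ other.length := by
  by_contra hgt
  push_neg at hgt
  rw [List.take_of_length_le (Nat.le_of_lt hgt)] at h
  rcases Nat.le_total opt.length L with ho | ho
  · rw [List.take_of_length_le ho] at h; exact hne h
  · have hL := congrArg List.length h
    simp only [List.length_take] at hL
    omega

-- 'while other[:length] == opt[:length]: length += 1', run on the char lists
-- (other ≠ opt is carried as a hypothesis: Python reaches the loop only under that test)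
def pvA_while (other opt : List Char) (hne : other ≠ opt) (length : Nat) : Nat :=
  if h : other.take length = opt.take length then
    pvA_while other opt hne (length + 1)
  else
    length
termination_by other.length + 1 - length
decreasing_by have := pvA_take_le hne h; omega

-- literal port of A: opt[:length] with a nonnegative length is List.take (exact here)
def get_unambiguous_prefix_py (opt : String) (args : List (List String × String)) : String :=
  let length : Nat :=
    args.foldl (fun len p =>
      p.1.foldl (fun len other =>
        if h : other ≠ opt then
          pvA_while other.toList opt.toList
            (fun hl => h (String.toList_inj.mp hl)) len
        else len) len) ("--".length + 1)
  String.mk (opt.toList.take length)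

-- ===== PORT B =====
-- zip/break counter: length of the common prefix of two char lists
def pvB_lcp : List Char → List Char → Nat
  | x :: xs, y :: ys => if x = y then pvB_lcp xs ys + 1 else 0
  | _, _ => 0

def get_unambiguous_prefix_py_alt (opt : String) (args : List (List String × String)) : String :=
  let best : Nat :=
    args.foldl (fun b p =>
      p.1.foldl (fun b other =>
        if other ≠ opt then
          let c := pvB_lcp other.toList opt.toList
          if c > b then c else b
        else b) b) 2
  String.mk (opt.toList.take (best + 1))

-- ===== PRECONDITION & SPEC =====
def Spec_get_unambiguous_prefix_py (opt : String) (args : List (List String × String)) (out : String) : Prop := out = get_unambiguous_prefix_py_alt opt args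
instance (opt : String) (args : List (List String × String)) (out : String) : Decidable (Spec_get_unambiguous_prefix_py opt args out) := by unfold Spec_get_unambiguous_prefix_py; infer_instance

-- ===== CLAIM (what is proved, stated in full; the proofs are below) =====
def Claim_equal_get_unambiguous_prefix_py : Prop := ∀ (opt : String) (args : List (List String × String)), Dom_get_unambiguous_prefix_py opt args → Spec_get_unambiguous_prefix_py opt args (get_unambiguous_prefix_py opt args)

-- ===== LEMMAS AND PROOFS =====

-- slices agree exactly up to the common-prefix length (for distinct lists)
theorem pvLcp_take_iff {xs ys : List Char} (hne : xs ≠ ys) (L : Nat) :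
    xs.take L = ys.take L ↔ L ≤ pvB_lcp xs ys := by
  induction xs generalizing ys L with
  | nil =>
    cases ys with
    | nil => exact absurd rfl hne
    | cons y ys =>
      simp only [List.take_nil, pvB_lcp]
      cases L with
      | zero => simp
      | succ L => simp [List.take_succ_cons]
  | cons x xs ih =>
    cases ys with
    | nil =>
      simp only [List.take_nil, pvB_lcp]
      cases L with
      | zero => simp
      | succ L => simp [List.take_succ_cons]
    | cons y ys =>
      cases L with
      | zero => simp
      | succ L =>
        simp only [List.take_succ_cons, List.cons.injEq, pvB_lcp]
        by_cases hxy : x = y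
        · subst hxy
          have hne' : xs ≠ ys := fun h => hne (by rw [h])
          simp [ih hne' L]
        · simp [hxy]

-- A's while loop computes max length (lcp + 1)
theorem pvA_while_eq (other opt : List Char) (hne : other ≠ opt) (L : Nat) :
    pvA_while other opt hne L = max L (pvB_lcp other opt + 1) := by
  rw [pvA_while]
  split
  · rename_i h
    have hc := (pvLcp_take_iff hne L).mp h
    rw [pvA_while_eq other opt hne (L + 1)]
    omega
  · rename_i h
    have hc : ¬ L ≤ pvB_lcp other opt := fun hc => h ((pvLcp_take_iff hne L).mpr hc)
    omega
termination_by other.length + 1 - L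
decreasing_by rename_i h; have := pvA_take_le hne h; omega

-- the two inner-step functions keep the invariant lenA = bestB + 1
theorem pv_inner_fold (opt : String) (others : List String) (b : Nat) :
    others.foldl (fun len other =>
      if h : other ≠ opt then
        pvA_while other.toList opt.toList (fun hl => h (String.toList_inj.mp hl)) len
      else len) (b + 1)
    = (others.foldl (fun b other =>
        if other ≠ opt then
          let c := pvB_lcp other.toList opt.toList
          if c > b then c else b
        else b) b) + 1 := by
  induction others generalizing b with
  | nil => rfl
  | cons o os ih =>
    simp only [List.foldl_cons]
    by_cases h : o ≠ opt
    · have hl : o.toList ≠ opt.toList := fun hl => h (String.toList_inj.mp hl)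
      rw [dif_pos h, if_pos h, pvA_while_eq _ _ _ (b + 1)]
      have hmax : max (b + 1) (pvB_lcp o.toList opt.toList + 1)
          = (if pvB_lcp o.toList opt.toList > b then pvB_lcp o.toList opt.toList else b) + 1 := by
        split <;> omega
      rw [hmax, ih]
    · rw [dif_neg h, if_neg h, ih]

theorem pv_outer_fold (opt : String) (args : List (List String × String)) (b : Nat) :
    args.foldl (fun len p =>
      p.1.foldl (fun len other =>
        if h : other ≠ opt then
          pvA_while other.toList opt.toList (fun hl => h (String.toList_inj.mp hl)) len
        else len) len) (b + 1)
    = (args.foldl (fun b p =>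
        p.1.foldl (fun b other =>
          if other ≠ opt then
            let c := pvB_lcp other.toList opt.toList
            if c > b then c else b
          else b) b) b) + 1 := by
  induction args generalizing b with
  | nil => rfl
  | cons p ps ih =>
    simp only [List.foldl_cons]
    rw [pv_inner_fold, ih]

-- ===== VERDICT (by name: the statement is the Claim_ definition above) =====
theorem get_unambiguous_prefix_py_spec : Claim_equal_get_unambiguous_prefix_py := by
  intro opt args _
  unfold Spec_get_unambiguous_prefix_py get_unambiguous_prefix_py get_unambiguous_prefix_py_alt
  have h3 : ("--".length + 1) = 2 + 1 := rfl
  rw [h3, pv_outer_fold]
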